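-- pv_equiv track=rewrite | github.com/hugo-galli883/pdf-splitter | sort.py | gamma
-- ===== SOURCE A (Python) =====
-- def gamma(noms):
--     noms2 = []
--     for i in range(len(noms)//4):
--         a = noms[4*i]
--         b = noms[4*i+1]
--         c = noms[4*i+2]
--         d = noms[4*i+3]
--         noms2.append(d)
--         noms2.append(a)
--         noms2.append(b)
--         noms2.append(c)
--     return noms2
-- ===== SOURCE B (Python) =====
-- def gamma(noms):
--     m = len(noms) // 4
--     trunc = noms[:4 * m]
--     return [trunc[k + 3 if k % 4 == 0 else k - 1] for k in range(len(trunc))]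
-- ===== Notes on version B (the rewrite author's own statement) =====
-- stated objective: simpler
-- what changed: B has no notion of groups at all: it truncates the input to a multiple of 4 and fills each output position k by a closed-form index permutation (trunc[k+3] at a block start, trunc[k-1] otherwise), replacing A's loop that walks group by group emitting each rotated quadruple.
import Mathlib
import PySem

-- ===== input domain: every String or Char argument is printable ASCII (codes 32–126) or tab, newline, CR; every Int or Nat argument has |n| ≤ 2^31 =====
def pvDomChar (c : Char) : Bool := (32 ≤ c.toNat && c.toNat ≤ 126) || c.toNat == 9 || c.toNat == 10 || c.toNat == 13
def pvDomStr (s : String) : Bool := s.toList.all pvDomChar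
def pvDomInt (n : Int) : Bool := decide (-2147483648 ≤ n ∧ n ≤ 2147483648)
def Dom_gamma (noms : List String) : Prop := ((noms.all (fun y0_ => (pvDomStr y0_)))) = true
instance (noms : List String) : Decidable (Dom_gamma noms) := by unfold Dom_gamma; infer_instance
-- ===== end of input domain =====

-- B drops A's group-by-group loop: it truncates to a multiple of 4 and fills each output
-- position by a closed-form index permutation (k ↦ k+3 at block starts, else k-1) — simpler, same O(n).


-- ===== PORT A =====
-- for i in range(len(noms)//4): a,b,c,d = noms[4i..4i+3]; append d,a,b,c.
-- Indices 4*i..4*i+3 are always in range for i < len//4, so pyGetD with a default is exact here.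
def gamma (noms : List String) : List String :=
  (PySem.List.pyRange 0 (PySem.Int.floordiv (noms.length : Int) 4) 1).foldl
    (fun noms2 i =>
      let a := PySem.List.pyGetD noms (4*i) ""
      let b := PySem.List.pyGetD noms (4*i+1) ""
      let c := PySem.List.pyGetD noms (4*i+2) ""
      let d := PySem.List.pyGetD noms (4*i+3) ""
      ((((noms2 ++ [d]) ++ [a]) ++ [b]) ++ [c])) []

-- ===== PORT B =====
-- Source B: m = len(noms)//4 (nonnegative, so Nat division is exact); trunc = noms[:4*m]
-- (nonnegative upper bound, so List.take is the exact slice); then one comprehension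
-- over range(len(trunc)) reading trunc at the permuted index (all indices nonnegative).
def gamma_alt (noms : List String) : List String :=
  let m := noms.length / 4
  let trunc := noms.take (4 * m)
  (List.range trunc.length).map
    (fun (k : Nat) => PySem.List.pyGetD trunc
      (if k % 4 == 0 then ((k : Int) + 3) else ((k : Int) - 1)) "")

-- ===== PRECONDITION & SPEC =====
def Spec_gamma (noms : List String) (out : List String) : Prop := out = gamma_alt noms
instance (noms : List String) (out : List String) : Decidable (Spec_gamma noms out) := by unfold Spec_gamma; infer_instance

-- ===== CLAIM (what is proved, stated in full; the proofs are below) =====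
def Claim_equal_gamma : Prop := ∀ (noms : List String), Dom_gamma noms → Spec_gamma noms (gamma noms)

-- ===== LEMMAS AND PROOFS =====

-- one loop iteration of A, with the indices as naturals
def chunkBody (noms : List String) (k : Nat) : List String :=
  [noms.getD (4*k+3) "", noms.getD (4*k) "", noms.getD (4*k+1) "", noms.getD (4*k+2) ""]

-- A's fold is the flatMap of chunkBody over range(len//4)
lemma gamma_eq (noms : List String) :
    gamma noms = (List.range (noms.length / 4)).flatMap (chunkBody noms) := by
  unfold gamma
  rw [show ((4:Int) = ((4:Nat):Int)) by norm_num, PySem.Int.floordiv_natCast,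
      PySem.List.pyRange_zero_natCast]
  simp only [List.append_assoc, List.cons_append, List.nil_append]
  rw [PySem.List.foldl_append_eq_flatMap
        (g := fun i => [PySem.List.pyGetD noms (((4:Nat):Int)*i+3) "",
          PySem.List.pyGetD noms (((4:Nat):Int)*i) "",
          PySem.List.pyGetD noms (((4:Nat):Int)*i+1) "",
          PySem.List.pyGetD noms (((4:Nat):Int)*i+2) ""]),
      List.flatMap_map, List.nil_append]
  congr 1
  funext k
  simp only [chunkBody]
  rw [show (((4:Nat):Int)*(k:Int)+3) = ((4*k+3 : Nat) : Int) by push_cast; ring,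
      show (((4:Nat):Int)*(k:Int)) = ((4*k : Nat) : Int) by push_cast; ring]
  rw [show (((4*k:Nat)):Int)+1 = ((4*k+1 : Nat) : Int) by push_cast; ring,
      show (((4*k:Nat)):Int)+2 = ((4*k+2 : Nat) : Int) by push_cast; ring]
  simp only [PySem.List.pyGetD_natCast]

-- the index permutation of B, on naturals
def permIdx (k : Nat) : Nat := if k % 4 = 0 then k + 3 else k - 1

-- B's comprehension over any list l, read position-wise, equals A's chunk flatMap
lemma map_perm (l : List String) (m : Nat) :
    (List.range (4*m)).map (fun k => l.getD (permIdx k) "") =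
      (List.range m).flatMap (chunkBody l) := by
  induction m with
  | zero => simp
  | succ m ih =>
    rw [show 4*(m+1) = 4*m + 4 from by ring, List.range_add, List.map_append, ih,
        List.range_succ (n := m), List.flatMap_append]
    congr 1
    have e : (List.range 4).map (fun j => 4*m + j) = [4*m, 4*m+1, 4*m+2, 4*m+3] := by
      simp [List.range_succ]
    rw [e]
    simp only [List.map_cons, List.map_nil, chunkBody, List.flatMap_cons, List.flatMap_nil,
      List.append_nil, permIdx]
    have h0 : (4*m) % 4 = 0 := by omega
    have h1 : (4*m+1) % 4 ≠ 0 := by omega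
    have h2 : (4*m+2) % 4 ≠ 0 := by omega
    have h3 : (4*m+3) % 4 ≠ 0 := by omega
    rw [if_pos h0, if_neg h1, if_neg h2, if_neg h3]
    norm_num

-- reading the truncated prefix at an in-range index reads the original list
lemma getD_take (l : List String) (n i : Nat) (h : i < n) :
    (l.take n).getD i "" = l.getD i "" := by
  simp only [List.getD_eq_getElem?_getD]
  by_cases hi : i < l.length
  · rw [List.getElem?_take_of_lt h]
  · rw [List.getElem?_eq_none (by simp; omega), List.getElem?_eq_none (by omega)]

theorem gamma_eq_alt (noms : List String) : gamma noms = gamma_alt noms := by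
  show gamma noms =
    (List.range (noms.take (4 * (noms.length / 4))).length).map
      (fun (k : Nat) => PySem.List.pyGetD (noms.take (4 * (noms.length / 4)))
        (if k % 4 == 0 then ((k : Int) + 3) else ((k : Int) - 1)) "")
  set m := noms.length / 4 with hm
  have hle : 4 * m ≤ noms.length := by omega
  have hlen : (noms.take (4*m)).length = 4*m := by simp [hle]
  rw [gamma_eq, hlen, ← map_perm noms m]
  apply List.map_congr_left
  intro k hk
  have hk4 : k < 4*m := List.mem_range.mp hk
  by_cases h : k % 4 = 0
  · have hi : (if (k % 4 == 0) = true then (k:Int)+3 else (k:Int)-1) = ((k+3 : Nat) : Int) := by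
      simp [h]
    rw [hi, PySem.List.pyGetD_natCast, permIdx, if_pos h, getD_take _ _ _ (by omega)]
  · have hk1 : 1 ≤ k := by omega
    have hi : (if (k % 4 == 0) = true then (k:Int)+3 else (k:Int)-1) = ((k-1 : Nat) : Int) := by
      simp [h]; omega
    rw [hi, PySem.List.pyGetD_natCast, permIdx, if_neg h, getD_take _ _ _ (by omega)]

-- ===== VERDICT (by name: the statement is the Claim_ definition above) =====
theorem gamma_spec : Claim_equal_gamma := by
  intro noms _
  show gamma noms = gamma_alt noms
  exact gamma_eq_alt noms
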